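-- pv_equiv track=rewrite | github.com/gavazquez/chirp_wouxun_uvr5_driver | kguv920pa.py | _freq_decode
-- ===== SOURCE A (Python) =====
-- def _freq_decode(in_freq, bytes=4):
--     out_freq = 0
--     for i in range(bytes*2):
--         out_freq += (in_freq & 0xF) * (10 ** i)
--         in_freq = in_freq >> 4
--     if bytes == 4:
--         return out_freq * 10
--     elif bytes == 2:
--         return out_freq * 100000
-- ===== SOURCE B (Python) =====
-- def _freq_decode(in_freq, bytes=4):
--     # Recursive byte-wise decode: each BCD byte holds two digits, so decode
--     # the low byte as a 0..99 pair and combine recursively in base 100,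
--     # instead of looping over single nibbles with explicit 10**i powers.
--     def dec2(v, n):
--         if n == 0:
--             return 0
--         return (v & 0xF) + 10 * ((v >> 4) & 0xF) + 100 * dec2(v >> 8, n - 1)
--     if bytes == 4:
--         return dec2(in_freq, 4) * 10
--     if bytes == 2:
--         return dec2(in_freq, 2) * 100000
--     return None
-- ===== Notes on version B (the rewrite author's own statement) =====
-- stated objective: alternative
-- what changed: B replaces A's iterative per-nibble loop (which mutates a shifted copy of the input and weights each nibble by an explicit 10**i power) with a recursion over whole bytes: each step decodes one BCD byte as a two-digit 0..99 value and combines results in base 100, and decoding happens only inside the valid bytes==4/2 branches.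
import Mathlib
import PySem

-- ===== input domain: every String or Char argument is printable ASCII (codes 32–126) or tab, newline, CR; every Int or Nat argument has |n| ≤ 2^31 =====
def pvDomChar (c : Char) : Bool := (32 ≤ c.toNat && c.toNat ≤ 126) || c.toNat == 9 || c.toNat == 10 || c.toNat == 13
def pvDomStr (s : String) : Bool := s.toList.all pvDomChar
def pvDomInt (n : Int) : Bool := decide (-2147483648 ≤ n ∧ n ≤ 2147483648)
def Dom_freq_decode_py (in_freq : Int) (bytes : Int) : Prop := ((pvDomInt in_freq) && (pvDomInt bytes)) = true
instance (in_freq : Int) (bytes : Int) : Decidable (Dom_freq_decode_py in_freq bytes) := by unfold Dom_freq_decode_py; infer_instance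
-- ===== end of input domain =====

-- B decodes the value recursively one BCD byte (two digits) at a time, combining in base 100,
-- instead of A's iterative per-nibble loop with explicit 10^i powers (alternative decomposition, same cost).

-- ===== PORT A =====
-- loop state: (out_freq, in_freq); i ranges over range(bytes*2), whose elements are ≥ 0, so 10**i = 10 ^ i.toNat exactly
def freq_decode_py (in_freq : Int) (bytes : Int) : Option Int :=
  let st := (PySem.List.pyRange 0 (bytes * 2) 1).foldl
    (fun (st : Int × Int) (i : Int) =>
      (st.1 + (Int.land st.2 0xF) * (10 : Int) ^ i.toNat, st.2 >>> (4 : Nat)))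
    (0, in_freq)
  if bytes = 4 then some (st.1 * 10)
  else if bytes = 2 then some (st.1 * 100000)
  else none

-- ===== PORT B =====
-- dec2 is only called with the literal counts 4 and 2, so its counter is a Nat
def pvDec2 (v : Int) : Nat → Int
  | 0 => 0
  | n + 1 => Int.land v 0xF + 10 * Int.land (v >>> (4 : Nat)) 0xF + 100 * pvDec2 (v >>> (8 : Nat)) n

def freq_decode_py_alt (in_freq : Int) (bytes : Int) : Option Int :=
  if bytes = 4 then some (pvDec2 in_freq 4 * 10)
  else if bytes = 2 then some (pvDec2 in_freq 2 * 100000)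
  else none

-- ===== PRECONDITION & SPEC =====
def Spec_freq_decode_py (in_freq : Int) (bytes : Int) (out : Option Int) : Prop := out = freq_decode_py_alt in_freq bytes
instance (in_freq : Int) (bytes : Int) (out : Option Int) : Decidable (Spec_freq_decode_py in_freq bytes out) := by unfold Spec_freq_decode_py; infer_instance

-- ===== CLAIM (what is proved, stated in full; the proofs are below) =====
def Claim_equal_freq_decode_py : Prop := ∀ (in_freq : Int) (bytes : Int), Dom_freq_decode_py in_freq bytes → Spec_freq_decode_py in_freq bytes (freq_decode_py in_freq bytes)

-- ===== LEMMAS AND PROOFS =====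

-- ===== VERDICT (by name: the statement is the Claim_ definition above) =====
theorem shift_shift (f : Int) (a b : Nat) : f >>> a >>> b = f >>> (a + b) :=
  (Int.shiftRight_add f a b).symm

theorem agree8 (f : Int) :
    ((PySem.List.pyRange 0 (8 : Int) 1).foldl
      (fun (st : Int × Int) (i : Int) =>
        (st.1 + (Int.land st.2 0xF) * (10 : Int) ^ i.toNat, st.2 >>> (4 : Nat)))
      (0, f)).1 = pvDec2 f 4 := by
  have hr : PySem.List.pyRange 0 (8 : Int) 1 = [0,1,2,3,4,5,6,7] := by decide
  rw [hr]
  simp [List.foldl, pvDec2, shift_shift]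
  ring_nf

theorem agree4 (f : Int) :
    ((PySem.List.pyRange 0 (4 : Int) 1).foldl
      (fun (st : Int × Int) (i : Int) =>
        (st.1 + (Int.land st.2 0xF) * (10 : Int) ^ i.toNat, st.2 >>> (4 : Nat)))
      (0, f)).1 = pvDec2 f 2 := by
  have hr : PySem.List.pyRange 0 (4 : Int) 1 = [0,1,2,3] := by decide
  rw [hr]
  simp [List.foldl, pvDec2, shift_shift]
  ring_nf

theorem freq_decode_py_eq (in_freq bytes : Int) :
    freq_decode_py in_freq bytes = freq_decode_py_alt in_freq bytes := by
  unfold freq_decode_py freq_decode_py_alt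
  by_cases h4 : bytes = 4
  · subst h4; norm_num; exact agree8 in_freq
  · by_cases h2 : bytes = 2
    · subst h2; norm_num; exact agree4 in_freq
    · simp [h4, h2]

theorem freq_decode_py_spec : Claim_equal_freq_decode_py := by
  intro f b _
  unfold Spec_freq_decode_py
  exact freq_decode_py_eq f b
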